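-- pv_equiv track=rewrite | github.com/HelmutQualtinger/finance | gen_wetter_wilhelminenberg.py | beaufort
-- ===== SOURCE A (Python) =====
-- def beaufort(kmh):
--     bft = 0
--     thresholds = [1,6,12,20,29,39,50,62,75,89,103,117]
--     for t in thresholds:
--         if kmh >= t:
--             bft += 1
--         else:
--             break
--     return bft
-- ===== SOURCE B (Python) =====
-- import bisect
--
-- def beaufort(kmh):
--     thresholds = [1, 6, 12, 20, 29, 39, 50, 62, 75, 89, 103, 117]
--     return bisect.bisect_right(thresholds, kmh)
-- ===== Notes on version B (the rewrite author's own statement) =====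
-- stated objective: idiomatic
-- what changed: Replaces the sequential count-with-break loop over the thresholds by bisect.bisect_right, a binary search that directly returns the number of thresholds <= kmh.
import Mathlib
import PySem

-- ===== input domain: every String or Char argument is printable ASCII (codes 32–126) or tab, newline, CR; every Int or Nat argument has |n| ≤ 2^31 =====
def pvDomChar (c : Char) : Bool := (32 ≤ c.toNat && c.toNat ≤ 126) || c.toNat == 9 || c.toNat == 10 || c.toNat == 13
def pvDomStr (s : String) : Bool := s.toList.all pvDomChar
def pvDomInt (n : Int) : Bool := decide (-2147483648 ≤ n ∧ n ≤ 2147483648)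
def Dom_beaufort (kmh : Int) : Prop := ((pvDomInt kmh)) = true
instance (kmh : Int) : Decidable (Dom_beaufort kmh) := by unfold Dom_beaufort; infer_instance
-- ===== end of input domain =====

-- B replaces A's sequential count-with-break loop by bisect.bisect_right (binary search); idiomatic, same result.

-- ===== PORT A =====
-- the for-loop with break: count thresholds while kmh ≥ t, stop at the first failure
def beaufortLoop (kmh : Int) : List Int → Int → Int
  | [], bft => bft
  | t :: ts, bft => if kmh ≥ t then beaufortLoop kmh ts (bft + 1) else bft

def beaufort (kmh : Int) : Int :=
  beaufortLoop kmh [1, 6, 12, 20, 29, 39, 50, 62, 75, 89, 103, 117] 0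

-- ===== PORT B =====
-- transliteration of bisect.bisect_right's while-loop (fuel = list length bounds the iterations)
def bisectRight (a : List Int) (x : Int) : Nat → Nat → Nat → Nat
  | 0, lo, _ => lo
  | fuel + 1, lo, hi =>
    if lo < hi then
      let mid := (lo + hi) / 2
      if x < a.getD mid 0 then bisectRight a x fuel lo mid
      else bisectRight a x fuel (mid + 1) hi
    else lo

def beaufort_alt (kmh : Int) : Int :=
  let thresholds : List Int := [1, 6, 12, 20, 29, 39, 50, 62, 75, 89, 103, 117]
  (bisectRight thresholds kmh thresholds.length 0 thresholds.length : Int)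

-- ===== PRECONDITION & SPEC =====
def Spec_beaufort (kmh : Int) (out : Int) : Prop := out = beaufort_alt kmh
instance (kmh : Int) (out : Int) : Decidable (Spec_beaufort kmh out) := by unfold Spec_beaufort; infer_instance

-- ===== CLAIM (what is proved, stated in full; the proofs are below) =====
def Claim_equal_beaufort : Prop := ∀ (kmh : Int), Dom_beaufort kmh → Spec_beaufort kmh (beaufort kmh)

-- ===== LEMMAS AND PROOFS =====

-- ===== VERDICT (by name: the statement is the Claim_ definition above) =====
set_option maxHeartbeats 2000000 in
theorem beaufort_spec : Claim_equal_beaufort := by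
  intro kmh _
  unfold Spec_beaufort beaufort beaufort_alt
  simp [beaufortLoop, bisectRight]
  split_ifs <;> omega
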